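-- pv_equiv track=rewrite | github.com/yeon-dong/Algorithm | 프로그래머스/0/181913. 문자열 여러 번 뒤집기/문자열 여러 번 뒤집기.py | solution
-- ===== SOURCE A (Python) =====
-- def solution(my_string, queries):
--     for i in queries:
--         answer=''
--         a=list(my_string[i[0]:i[1]+1])
--         a.reverse()
--         answer = my_string[:i[0]]
--         for j in a:
--             answer += j
--         answer += my_string[i[1]+1:]
--         my_string = answer
--     return my_string
-- ===== SOURCE B (Python) =====
-- def solution(my_string, queries):
--     # Rope of (chars, reversed?) pieces with lazy reversal flags; each query
--     # splits the rope at the two cut points and flips the middle pieces, and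
--     # the answer is materialized once at the end.
--     rope = [(my_string, False)]
--
--     def split(rp, k):
--         # (pieces holding the first k chars, pieces holding the rest)
--         left = []
--         for idx, (s, rev) in enumerate(rp):
--             if len(s) <= k:
--                 left.append((s, rev))
--                 k -= len(s)
--             else:
--                 if k > 0:
--                     if rev:
--                         left.append((s[len(s) - k:], True))
--                         return left, [(s[:len(s) - k], True)] + rp[idx + 1:]
--                     left.append((s[:k], False))
--                     return left, [(s[k:], False)] + rp[idx + 1:]
--                 return left, rp[idx:]
--         return left, []
--
--     for q in queries:
--         n = sum(len(s) for s, _ in rope)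
--         lo, hi = q[0], q[1] + 1
--         if lo < 0:
--             lo += n
--         lo = 0 if lo < 0 else (n if lo > n else lo)
--         if hi < 0:
--             hi += n
--         hi = 0 if hi < 0 else (n if hi > n else hi)
--         pre, _ = split(rope, lo)
--         hi_part, post = split(rope, hi)
--         _, mid = split(hi_part, lo)
--         rope = pre + [(s, not r) for (s, r) in reversed(mid)] + post
--
--     return ''.join(s[::-1] if r else s for s, r in rope)
-- ===== Notes on version B (the rewrite author's own statement) =====
-- stated objective: alternative
-- what changed: B represents the string as a rope of lazily-reversed pieces: each query only splits the rope at the two cut points and flips the middle pieces' reversal flags, and the string is materialized once at the end, instead of rebuilding the whole string (with a character-by-character append loop) on every query.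
-- outside the precondition, e.g. on solution('abc', [[1]]): A raises IndexError, B raises IndexError
import Mathlib
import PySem

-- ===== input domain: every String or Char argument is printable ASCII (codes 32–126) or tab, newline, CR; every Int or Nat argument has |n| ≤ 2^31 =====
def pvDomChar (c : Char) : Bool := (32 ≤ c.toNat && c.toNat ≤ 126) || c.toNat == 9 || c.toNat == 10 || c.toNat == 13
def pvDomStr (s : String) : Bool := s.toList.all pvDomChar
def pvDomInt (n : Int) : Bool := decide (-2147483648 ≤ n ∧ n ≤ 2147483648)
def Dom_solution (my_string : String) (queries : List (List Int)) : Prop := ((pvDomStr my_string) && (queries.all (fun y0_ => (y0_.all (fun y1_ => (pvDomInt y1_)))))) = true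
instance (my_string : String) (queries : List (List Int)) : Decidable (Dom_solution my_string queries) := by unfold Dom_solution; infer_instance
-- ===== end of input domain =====

-- B keeps the string as a rope of lazily-reversed pieces, splitting the rope at the two cut
-- points per query and materializing once at the end, instead of rebuilding the whole string
-- (with a character-by-character append loop) on every query.


-- ===== PORT A =====
def solution (my_string : String) (queries : List (List Int)) : String :=
  String.ofList <| queries.foldl (fun s i =>
    match i with
    | i0 :: i1 :: _ =>
      let a := (PySem.List.slice s (some i0) (some (i1 + 1))).reverse  -- a = list(my_string[i[0]:i[1]+1]); a.reverse()
      let answer := PySem.List.slice s none (some i0)                  -- answer = my_string[:i[0]]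
      let answer := a.foldl (fun acc j => acc ++ [j]) answer           -- for j in a: answer += j
      answer ++ PySem.List.slice s (some (i1 + 1)) none                -- answer += my_string[i[1]+1:]
    | _ => s                                                           -- query shorter than 2: IndexError in Python, outside Pre_
  ) my_string.toList

-- ===== PORT B =====
-- a rope piece is (chars, reversed?); ropeSplit rp k = Python's split(rp, k):
-- (pieces holding the first k chars, pieces holding the rest)
def ropeSplit (rp : List (List Char × Bool)) (k : Int) :
    List (List Char × Bool) × List (List Char × Bool) :=
  match rp with
  | [] => ([], [])
  | (s, rev) :: rest =>
    if (s.length : Int) ≤ k then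
      let p := ropeSplit rest (k - s.length)                           -- left.append((s,rev)); k -= len(s)
      ((s, rev) :: p.1, p.2)
    else if 0 < k then
      if rev then
        ([(PySem.List.slice s (some ((s.length : Int) - k)) none, true)],
         (PySem.List.slice s none (some ((s.length : Int) - k)), true) :: rest)
      else
        ([(PySem.List.slice s none (some k), false)],
         (PySem.List.slice s (some k) none, false) :: rest)
    else ([], (s, rev) :: rest)                                        -- return left, rp[idx:]

-- the body of B's query loop
def ropeStep (rope : List (List Char × Bool)) (q : List Int) : List (List Char × Bool) :=
  let n : Int := (rope.map (fun p => (p.1.length : Int))).sum          -- n = sum(len(s) for s,_ in rope)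
  let lo0 := PySem.List.pyGetD q 0 0                                   -- q[0] (present under Pre_)
  let hi0 := PySem.List.pyGetD q 1 0 + 1                               -- q[1] + 1
  let lo1 := if lo0 < 0 then lo0 + n else lo0
  let lo := if lo1 < 0 then 0 else if lo1 > n then n else lo1
  let hi1 := if hi0 < 0 then hi0 + n else hi0
  let hi := if hi1 < 0 then 0 else if hi1 > n then n else hi1
  let pre := (ropeSplit rope lo).1
  let hp := ropeSplit rope hi
  let mid := (ropeSplit hp.1 lo).2
  pre ++ mid.reverse.map (fun p => (p.1, !p.2)) ++ hp.2

def solution_alt (my_string : String) (queries : List (List Int)) : String :=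
  let rope := queries.foldl ropeStep [(my_string.toList, false)]
  String.ofList ((rope.map (fun p => if p.2 then p.1.reverse else p.1)).flatten)

-- ===== PRECONDITION & SPEC =====
-- Pre_ excludes exactly the queries with fewer than two entries, on which A raises IndexError.
def Pre_solution (my_string : String) (queries : List (List Int)) : Prop :=
  ∀ q ∈ queries, 2 ≤ q.length
instance (my_string : String) (queries : List (List Int)) : Decidable (Pre_solution my_string queries) := by unfold Pre_solution; infer_instance

def pvWitness_solution : String × List (List Int) := ("hello", [[1, 3], [0, 4]])

def Spec_solution (my_string : String) (queries : List (List Int)) (out : String) : Prop := out = solution_alt my_string queries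
instance (my_string : String) (queries : List (List Int)) (out : String) : Decidable (Spec_solution my_string queries out) := by unfold Spec_solution; infer_instance

-- ===== CLAIM (what is proved, stated in full; the proofs are below) =====
def Claim_equal_solution : Prop := ∀ (my_string : String) (queries : List (List Int)), Dom_solution my_string queries → Pre_solution my_string queries → Spec_solution my_string queries (solution my_string queries)

-- ===== LEMMAS AND PROOFS =====

-- materialization of a rope
def pvM (rp : List (List Char × Bool)) : List Char :=
  (rp.map (fun p => if p.2 then p.1.reverse else p.1)).flatten

theorem pvM_cons (s : List Char) (rev : Bool) (t : List (List Char × Bool)) :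
    pvM ((s, rev) :: t) = (if rev then s.reverse else s) ++ pvM t := by
  cases rev <;> simp [pvM]

theorem pvM_append (a b : List (List Char × Bool)) : pvM (a ++ b) = pvM a ++ pvM b := by
  simp [pvM]

theorem pvM_len (rp : List (List Char × Bool)) :
    (rp.map (fun p => (p.1.length : Int))).sum = ((pvM rp).length : Int) := by
  induction rp with
  | nil => rfl
  | cons p t ih =>
    obtain ⟨s, rev⟩ := p
    cases rev <;> simp [pvM, List.map_cons, List.sum_cons] at ih ⊢ <;> omega

-- B's inline clamp arithmetic computes Python's slice clamp
theorem pv_clamp_eq (n : Nat) (i : Int) :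
    (if (if i < 0 then i + n else i) < 0 then 0
     else if (if i < 0 then i + n else i) > (n : Int) then (n : Int)
     else (if i < 0 then i + n else i)) = ((PySem.List.clampIdx n i : Nat) : Int) := by
  unfold PySem.List.clampIdx
  split_ifs <;> omega

theorem pv_ropeSplit_fst (rp : List (List Char × Bool)) (k : Int) :
    pvM (ropeSplit rp k).1 = (pvM rp).take k.toNat := by
  induction rp generalizing k with
  | nil => simp [ropeSplit, pvM]
  | cons p t ih =>
    obtain ⟨s, rev⟩ := p
    by_cases h1 : (s.length : Int) ≤ k
    · have h2 : (if rev then s.reverse else s).length ≤ k.toNat := by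
        cases rev <;> simp <;> omega
      have h3 : (k - (s.length : Int)).toNat = k.toNat - s.length := by omega
      have hL : (ropeSplit ((s, rev) :: t) k).1 = (s, rev) :: (ropeSplit t (k - s.length)).1 := by
        simp [ropeSplit, h1]
      rw [hL, pvM_cons, pvM_cons, List.take_append, List.take_of_length_le h2, ih, h3]
      congr 2
      cases rev <;> simp
    · by_cases h2 : 0 < k
      · have hk : k.toNat ≤ s.length := by omega
        have hnn : (0 : Int) ≤ (s.length : Int) - k := by omega
        have hL : (ropeSplit ((s, rev) :: t) k).1 =
            (if rev then [(PySem.List.slice s (some ((s.length : Int) - k)) none, true)]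
             else [(PySem.List.slice s none (some k), false)]) := by
          cases rev <;> simp [ropeSplit, h1, h2]
        rw [hL, pvM_cons, List.take_append]
        cases rev with
        | false =>
          simp [pvM, PySem.List.slice_to s (le_of_lt h2), Nat.sub_eq_zero_of_le hk]
        | true =>
          simp [pvM, PySem.List.slice_from s hnn, List.take_reverse,
            Nat.sub_eq_zero_of_le hk]
          omega
      · have hk : k.toNat = 0 := by omega
        have hL : (ropeSplit ((s, rev) :: t) k).1 = [] := by
          simp [ropeSplit, h1, h2]
        rw [hL, hk]
        simp [pvM]

theorem pv_ropeSplit_snd (rp : List (List Char × Bool)) (k : Int) :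
    pvM (ropeSplit rp k).2 = (pvM rp).drop k.toNat := by
  induction rp generalizing k with
  | nil => simp [ropeSplit, pvM]
  | cons p t ih =>
    obtain ⟨s, rev⟩ := p
    by_cases h1 : (s.length : Int) ≤ k
    · have h2 : (if rev then s.reverse else s).length ≤ k.toNat := by
        cases rev <;> simp <;> omega
      have h3 : (k - (s.length : Int)).toNat = k.toNat - s.length := by omega
      have hL : (ropeSplit ((s, rev) :: t) k).2 = (ropeSplit t (k - s.length)).2 := by
        simp [ropeSplit, h1]
      rw [hL, pvM_cons, List.drop_append, List.drop_of_length_le h2, ih, h3]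
      congr 2
      cases rev <;> simp
    · by_cases h2 : 0 < k
      · have hk : k.toNat ≤ s.length := by omega
        have hnn : (0 : Int) ≤ (s.length : Int) - k := by omega
        have hL : (ropeSplit ((s, rev) :: t) k).2 =
            (if rev then (PySem.List.slice s none (some ((s.length : Int) - k)), true) :: t
             else (PySem.List.slice s (some k) none, false) :: t) := by
          cases rev <;> simp [ropeSplit, h1, h2]
        rw [hL]
        cases rev with
        | false =>
          rw [if_neg (by simp), pvM_cons, pvM_cons, if_neg (by simp), if_neg (by simp),
            PySem.List.slice_from s (le_of_lt h2), List.drop_append,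
            Nat.sub_eq_zero_of_le hk, List.drop_zero]
        | true =>
          rw [if_pos rfl, pvM_cons, pvM_cons, if_pos rfl, if_pos rfl,
            PySem.List.slice_to s hnn, List.drop_append,
            Nat.sub_eq_zero_of_le (show k.toNat ≤ s.reverse.length by simpa using hk),
            List.drop_zero, List.drop_reverse]
          congr 3
          omega
      · have hk : k.toNat = 0 := by omega
        have hL : (ropeSplit ((s, rev) :: t) k).2 = (s, rev) :: t := by
          simp [ropeSplit, h1, h2]
        rw [hL, hk, List.drop_zero]

theorem pv_flip_reverse (mid : List (List Char × Bool)) :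
    pvM (mid.reverse.map (fun p => (p.1, !p.2))) = (pvM mid).reverse := by
  induction mid with
  | nil => rfl
  | cons p t ih =>
    obtain ⟨s, rev⟩ := p
    cases rev <;> simp [pvM, List.map_append] at ih ⊢ <;> simp [ih]

-- one query step: the rope step materializes to A's string step
theorem pv_step (t : List (List Char × Bool)) (q : List Int) (i0 i1 : Int) (rest : List Int)
    (hq : q = i0 :: i1 :: rest) :
    pvM (ropeStep t q) =
      PySem.List.slice (pvM t) none (some i0)
        ++ (PySem.List.slice (pvM t) (some i0) (some (i1 + 1))).reverse
        ++ PySem.List.slice (pvM t) (some (i1 + 1)) none := by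
  subst hq
  have hg0 : PySem.List.pyGetD (i0 :: i1 :: rest) 0 0 = i0 :=
    PySem.List.pyGetD_zero_cons _ _ _
  have hg1 : PySem.List.pyGetD (i0 :: i1 :: rest) 1 0 = i1 := by
    simp [PySem.List.pyGetD, PySem.List.pyGet?, PySem.List.pyIdx?]
  simp only [ropeStep, hg0, hg1, pvM_len]
  rw [pv_clamp_eq, pv_clamp_eq]
  rw [pvM_append, pvM_append, pv_ropeSplit_fst, pv_flip_reverse, pv_ropeSplit_snd,
    pv_ropeSplit_snd, pv_ropeSplit_fst]
  unfold PySem.List.slice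
  simp only [Int.toNat_natCast, List.drop_zero, Nat.sub_zero, List.drop_take]
  congr 1
  rw [List.take_of_length_le (by simp)]

theorem pv_fold (qs : List (List Int)) (t : List (List Char × Bool))
    (hqs : ∀ q ∈ qs, 2 ≤ q.length) :
    qs.foldl (fun s i =>
      match i with
      | i0 :: i1 :: _ =>
        let a := (PySem.List.slice s (some i0) (some (i1 + 1))).reverse
        let answer := PySem.List.slice s none (some i0)
        let answer := a.foldl (fun acc j => acc ++ [j]) answer
        answer ++ PySem.List.slice s (some (i1 + 1)) none
      | _ => s) (pvM t)
    = pvM (qs.foldl ropeStep t) := by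
  induction qs generalizing t with
  | nil => rfl
  | cons q qs ih =>
    match q, hqs q (by simp) with
    | i0 :: i1 :: rest, _ =>
      simp only [List.foldl_cons]
      rw [PySem.List.foldl_append_singleton, ← pv_step t _ i0 i1 rest rfl,
        ih _ (fun r hr => hqs r (by simp [hr]))]

-- ===== VERDICT (by name: the statement is the Claim_ definition above) =====
theorem solution_spec : Claim_equal_solution := by
  intro my_string queries _ hpre
  unfold Spec_solution solution solution_alt
  have h := pv_fold queries [(my_string.toList, false)] hpre
  rw [show pvM [(my_string.toList, false)] = my_string.toList from by simp [pvM]] at h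
  rw [h]
  rfl
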